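-- pv_equiv track=rewrite | github.com/extractumio/ag3ntum | src/core/structured_output.py | _find_trailing_header
-- ===== SOURCE A (Python) =====
-- from typing import Dict, Tuple
--
-- def _find_trailing_header(lines: list) -> Tuple[int, int]:
--     """
--     Find a trailing header block at the end of lines.
--
--     Returns (start_index, end_index) of the header, or (-1, -1) if not found.
--     """
--     # Search backwards for the closing ---
--     end_index = -1
--     for i in range(len(lines) - 1, -1, -1):
--         if lines[i].strip() == "---":
--             end_index = i
--             break
--
--     if end_index == -1:
--         return -1, -1
--
--     # Search backwards from end_index for the opening ---
--     start_index = -1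
--     for i in range(end_index - 1, -1, -1):
--         if lines[i].strip() == "---":
--             start_index = i
--             break
--
--     if start_index == -1:
--         return -1, -1
--
--     # Verify this looks like a valid header block (has key: value pairs)
--     has_field = False
--     for line in lines[start_index + 1 : end_index]:
--         stripped = line.strip()
--         if stripped and ":" in stripped:
--             has_field = True
--             break
--
--     if not has_field:
--         return -1, -1
--
--     return start_index, end_index
-- ===== SOURCE B (Python) =====
-- def _find_trailing_header(lines: list):
--     """Single forward pass collecting all '---' marker indices; the header is
--     delimited by the last two markers, validated by a field check on the slice."""
--     markers = [i for i, line in enumerate(lines) if line.strip() == "---"]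
--     if len(markers) < 2:
--         return -1, -1
--     start, end = markers[-2], markers[-1]
--     if any(s and ":" in s for s in (ln.strip() for ln in lines[start + 1:end])):
--         return start, end
--     return -1, -1
-- ===== Notes on version B (the rewrite author's own statement) =====
-- stated objective: simpler
-- what changed: Replaces the two bounded backward scans (and the flag-setting verification loop) with one forward pass that collects all '---' marker indices, takes the last two, and validates the slice with any().
import Mathlib
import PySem

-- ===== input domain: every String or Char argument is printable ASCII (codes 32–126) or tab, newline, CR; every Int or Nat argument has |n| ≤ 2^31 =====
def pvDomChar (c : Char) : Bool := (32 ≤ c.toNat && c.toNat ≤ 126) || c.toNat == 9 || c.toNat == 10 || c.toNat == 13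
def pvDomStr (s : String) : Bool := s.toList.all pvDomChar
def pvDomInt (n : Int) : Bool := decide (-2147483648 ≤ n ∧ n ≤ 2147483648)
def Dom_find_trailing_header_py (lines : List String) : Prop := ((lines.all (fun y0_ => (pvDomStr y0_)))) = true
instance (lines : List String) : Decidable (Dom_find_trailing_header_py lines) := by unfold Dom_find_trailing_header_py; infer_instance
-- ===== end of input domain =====

-- B replaces A's two bounded backward scans by one forward pass collecting all marker
-- indices (objective: simpler decomposition; same O(n) cost).

-- ===== PORT A =====
-- Literal port of A: backward scan for the closing "---" (loop-with-break = find?,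
-- default -1), backward scan for the opening "---", then the flag-setting
-- verification loop over the slice (= any).
def find_trailing_header_py (lines : List String) : Int × Int :=
  let n : Int := lines.length
  let endIdx : Int := ((PySem.List.pyRange (n - 1) (-1) (-1)).find?
      (fun i => PySem.Str.strip (PySem.List.pyGetD lines i "") == "---")).getD (-1)
  if endIdx = -1 then (-1, -1)
  else
    let startIdx : Int := ((PySem.List.pyRange (endIdx - 1) (-1) (-1)).find?
        (fun i => PySem.Str.strip (PySem.List.pyGetD lines i "") == "---")).getD (-1)
    if startIdx = -1 then (-1, -1)
    else
      let hasField : Bool := (PySem.List.slice lines (some (startIdx + 1)) (some endIdx)).any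
          (fun line => let s := PySem.Str.strip line; !(s == "") && PySem.Str.isIn ":" s)
      if !hasField then (-1, -1) else (startIdx, endIdx)

-- ===== PORT B =====
-- Literal port of Source B: one comprehension over enumerate, last two markers by
-- negative indexing (the match is unreachable-none handling: length ≥ 2), any() on the slice.
def find_trailing_header_py_alt (lines : List String) : Int × Int :=
  let markers : List Int := ((PySem.List.enumerate lines 0).filter
      (fun p => PySem.Str.strip p.2 == "---")).map (fun p => p.1)
  if markers.length < 2 then (-1, -1)
  else
    match PySem.List.pyGet? markers (-2), PySem.List.pyGet? markers (-1) with
    | some start, some stop =>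
        if (PySem.List.slice lines (some (start + 1)) (some stop)).any
            (fun line => let s := PySem.Str.strip line; !(s == "") && PySem.Str.isIn ":" s)
        then (start, stop) else (-1, -1)
    | _, _ => (-1, -1)

-- ===== PRECONDITION & SPEC =====
def Spec_find_trailing_header_py (lines : List String) (out : Int × Int) : Prop := out = find_trailing_header_py_alt lines
instance (lines : List String) (out : Int × Int) : Decidable (Spec_find_trailing_header_py lines out) := by unfold Spec_find_trailing_header_py; infer_instance

-- ===== CLAIM (what is proved, stated in full; the proofs are below) =====
def Claim_equal_find_trailing_header_py : Prop := ∀ (lines : List String), Dom_find_trailing_header_py lines → Spec_find_trailing_header_py lines (find_trailing_header_py lines)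

-- ===== LEMMAS AND PROOFS =====

-- range(a-1, -1, -1) is range(0, a, 1) reversed (0 ≤ a).
theorem pv_countdown (a : Int) :
    PySem.List.pyRange (a - 1) (-1) (-1) = (PySem.List.pyRange 0 a 1).reverse := by
  rw [PySem.List.pyRange_neg_one, PySem.List.pyRange_one]
  have h1 : a - 1 - -1 = a := by ring
  have h2 : a - 0 = a := by ring
  rw [h1, h2, ← List.map_reverse]
  apply List.ext_getElem
  · simp
  · intro k hk1 hk2
    simp only [List.length_map, List.length_range] at hk1
    simp only [List.getElem_map, List.getElem_reverse, List.getElem_range, List.length_range]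
    omega

-- first hit of a backward scan = last hit of the forward scan
theorem pv_find_reverse (l : List Int) (p : Int → Bool) :
    l.reverse.find? p = (l.filter p).getLast? := by
  rw [← List.head?_filter, List.filter_reverse, List.head?_reverse]

-- B's marker list is the filter of the forward index range
theorem pv_markers_eq (lines : List String) :
    ((PySem.List.enumerate lines 0).filter
        (fun p => PySem.Str.strip p.2 == "---")).map (fun p => p.1)
      = (PySem.List.pyRange 0 (lines.length : Int) 1).filter
          (fun i => PySem.Str.strip (PySem.List.pyGetD lines i "") == "---") := by
  rw [PySem.List.enumerate_eq_map_pyRange (d := "")]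
  rw [List.filter_map, List.map_map]
  simp [Function.comp_def]

-- every element of the marker list is a nonnegative index below n
theorem pv_mem_markers {n : Int} {q : Int → Bool} {x : Int}
    (hx : x ∈ (PySem.List.pyRange 0 n 1).filter q) : 0 ≤ x ∧ x < n ∧ q x = true := by
  rcases List.mem_filter.1 hx with ⟨hr, hq⟩
  rcases (PySem.List.mem_pyRange_one).1 hr with ⟨h0, h1⟩
  exact ⟨h0, h1, hq⟩

-- in a strictly increasing list the last element bounds all elements
theorem pv_le_getLast {l : List Int} {e x : Int} (hp : l.Pairwise (· < ·))
    (hl : l.getLast? = some e) (hx : x ∈ l) : x ≤ e := by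
  have hne : l ≠ [] := by rintro rfl; simp at hl
  have hconc : l.dropLast ++ [l.getLast hne] = l := List.dropLast_append_getLast hne
  have he : l.getLast hne = e := by
    have := List.getLast?_eq_some_getLast (h := hne)
    rw [hl] at this; exact (Option.some.inj this).symm
  rw [← hconc] at hx hp
  rcases List.mem_append.1 hx with h | h
  · have := (List.pairwise_append.1 hp).2.2 x h (l.getLast hne) (by simp)
    omega
  · simp_all
-- if the last marker is e, the markers below e are exactly the markers without the last
theorem pv_dropLast_markers {n e : Int} {q : Int → Bool}
    (h : ((PySem.List.pyRange 0 n 1).filter q).getLast? = some e) :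
    (PySem.List.pyRange 0 e 1).filter q = ((PySem.List.pyRange 0 n 1).filter q).dropLast := by
  have hmem : e ∈ (PySem.List.pyRange 0 n 1).filter q := List.mem_of_getLast? h
  obtain ⟨he0, hen, hqe⟩ := pv_mem_markers hmem
  have hpair : ((PySem.List.pyRange 0 n 1).filter q).Pairwise (· < ·) :=
    (PySem.List.pairwise_lt_pyRange_one 0 n).filter q
  have hsplit : PySem.List.pyRange 0 n 1
      = PySem.List.pyRange 0 (e + 1) 1 ++ PySem.List.pyRange (e + 1) n 1 :=
    PySem.List.pyRange_one_append 0 (e + 1) n (by omega) (by omega)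
  have htailnil : (PySem.List.pyRange (e + 1) n 1).filter q = [] := by
    rw [List.filter_eq_nil_iff]
    intro x hx hqx
    have hxm : x ∈ (PySem.List.pyRange 0 n 1).filter q := by
      rw [hsplit]
      exact List.mem_filter.2 ⟨List.mem_append.2 (Or.inr hx), hqx⟩
    have hle : x ≤ e := pv_le_getLast hpair h hxm
    have := (PySem.List.mem_pyRange_one).1 hx
    omega
  have hsucc : PySem.List.pyRange 0 (e + 1) 1 = PySem.List.pyRange 0 e 1 ++ [e] :=
    PySem.List.pyRange_one_succ_right he0
  have hM : (PySem.List.pyRange 0 n 1).filter q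
      = (PySem.List.pyRange 0 e 1).filter q ++ [e] := by
    rw [hsplit, List.filter_append, htailnil, List.append_nil, hsucc, List.filter_append]
    simp [hqe]
  rw [hM, List.dropLast_concat]

-- getLast? of dropLast is the second-to-last getElem?
theorem pv_getLast_dropLast {l : List Int} (h : 2 ≤ l.length) :
    l.dropLast.getLast? = l[l.length - 2]? := by
  rw [List.getLast?_eq_getElem?, List.getElem?_dropLast, List.length_dropLast,
    if_pos (by omega)]
  congr 1

-- ===== VERDICT (by name: the statement is the Claim_ definition above) =====
theorem find_trailing_header_py_spec : Claim_equal_find_trailing_header_py := by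
  intro lines _
  show find_trailing_header_py lines = find_trailing_header_py_alt lines
  set q : Int → Bool := fun i => PySem.Str.strip (PySem.List.pyGetD lines i "") == "---" with hq
  set M : List Int := (PySem.List.pyRange 0 (lines.length : Int) 1).filter q with hM
  have hA1 : ((PySem.List.pyRange ((lines.length : Int) - 1) (-1) (-1)).find? q).getD (-1)
      = (M.getLast?).getD (-1) := by
    rw [pv_countdown, pv_find_reverse]
  have hBmark : ((PySem.List.enumerate lines 0).filter
      (fun p => PySem.Str.strip p.2 == "---")).map (fun p => p.1) = M := pv_markers_eq lines
  simp only [find_trailing_header_py, find_trailing_header_py_alt]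
  rw [← hq, hBmark, hA1]
  rcases hLast : M.getLast? with _ | e
  · -- no closing marker: M = []
    have hMnil : M = [] := List.getLast?_eq_none_iff.1 hLast
    rw [hMnil]
    simp
  · -- closing marker e found
    obtain ⟨he0, _, hqe⟩ := pv_mem_markers (x := e) (List.mem_of_getLast? hLast)
    have hene : ¬ (e = -1) := by omega
    have hA2 : ((PySem.List.pyRange (e - 1) (-1) (-1)).find? q).getD (-1)
        = (M.dropLast.getLast?).getD (-1) := by
      rw [pv_countdown, pv_find_reverse, hM, pv_dropLast_markers hLast]
    have hMne : M ≠ [] := by rintro hnil; rw [hnil] at hLast; simp at hLast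
    simp only [Option.getD_some]
    rw [if_neg hene, hA2]
    rcases hLast2 : M.dropLast.getLast? with _ | s
    · -- only one marker
      have hdnil : M.dropLast = [] := List.getLast?_eq_none_iff.1 hLast2
      have hlen : M.length < 2 := by
        have h1 := List.length_dropLast (xs := M)
        rw [hdnil] at h1
        simp at h1
        omega
      rw [if_pos hlen]
      simp
    · -- two markers: both sides compute the same (s, e) candidate and field check
      have hsM : s ∈ M := (List.dropLast_sublist M).mem (List.mem_of_getLast? hLast2)
      obtain ⟨hs0, _, _⟩ := pv_mem_markers hsM
      have hsne : ¬ (s = -1) := by omega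
      have hlen : 2 ≤ M.length := by
        have h2 : M.dropLast ≠ [] := by
          rintro hnil; rw [hnil] at hLast2; simp at hLast2
        have h1 := List.length_dropLast (xs := M)
        have h3 : 1 ≤ M.dropLast.length := List.length_pos_iff.2 h2
        have h4 : 1 ≤ M.length := List.length_pos_iff.2 hMne
        omega
      have hB2 : PySem.List.pyGet? M (-2) = some s := by
        rw [PySem.List.pyGet?_neg_ofNat M 2 (by omega) (by omega)]
        rw [← pv_getLast_dropLast hlen, hLast2]
      have hB1 : PySem.List.pyGet? M (-1) = some e := by
        rw [PySem.List.pyGet?_neg_one, hLast]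
      rw [if_neg (show ¬ (M.length < 2) by omega)]
      simp only [Option.getD_some, hB2, hB1]
      rw [if_neg hsne]
      cases hfield : (PySem.List.slice lines (some (s + 1)) (some e)).any
          (fun line => !(PySem.Str.strip line == "") && PySem.Str.isIn ":" (PySem.Str.strip line)) with
      | false => simp
      | true => simp
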